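-- pv_equiv track=rewrite | github.com/pademinune/Sudoku-Solver | sudoku.py | findMinLength
-- ===== SOURCE A (Python) =====
-- def findMinLength(lst):
--     values = list(lst.values())
--     minThing = values[0]
--     for i in values:
--         if len(i) < len(minThing):
--             minThing = i
--     for key,value in lst.items():
--         if value == minThing:
--             return key
-- ===== SOURCE B (Python) =====
-- def findMinLength(lst):
--     items = list(lst.items())
--     minKey, minVal = items[0]
--     for key, value in items[1:]:
--         if len(value) < len(minVal):
--             minKey, minVal = key, value
--     return minKey
-- ===== Notes on version B (the rewrite author's own statement) =====
-- stated objective: simpler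
-- what changed: B folds A's two passes (find the shortest value, then re-scan items comparing values for equality to recover its key) into one pass that tracks the winning key and value together, removing the equality re-scan.
import Mathlib
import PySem

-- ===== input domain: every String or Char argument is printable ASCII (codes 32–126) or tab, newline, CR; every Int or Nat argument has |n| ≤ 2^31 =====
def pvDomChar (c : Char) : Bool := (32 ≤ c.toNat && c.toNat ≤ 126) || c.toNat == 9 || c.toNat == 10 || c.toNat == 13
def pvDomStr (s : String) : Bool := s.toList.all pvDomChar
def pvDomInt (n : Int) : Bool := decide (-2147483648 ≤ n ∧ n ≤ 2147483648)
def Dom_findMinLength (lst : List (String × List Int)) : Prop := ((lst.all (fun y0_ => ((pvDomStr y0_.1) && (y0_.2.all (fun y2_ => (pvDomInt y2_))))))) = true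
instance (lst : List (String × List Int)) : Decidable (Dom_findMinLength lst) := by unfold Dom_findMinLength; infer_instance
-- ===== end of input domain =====

-- B folds A's two passes (min-length value, then an equality re-scan of items for its key)
-- into one pass tracking the key and value together; same return value on every non-empty dict.


-- ===== PORT A =====
def findMinLength (lst : List (String × List Int)) : String :=
  let values := lst.map (·.2)
  match values with
  | [] => ""          -- values[0] raises IndexError; excluded by Pre_
  | v0 :: _ =>
    let minThing := values.foldl (fun m i => if i.length < m.length then i else m) v0
    -- second loop: return the first key whose value == minThing (always found when lst ≠ [])
    match lst.find? (fun kv => kv.2 == minThing) with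
    | some kv => kv.1
    | none => ""      -- Python falls through returning None; unreachable for lst ≠ []

-- ===== PORT B =====
def findMinLength_alt (lst : List (String × List Int)) : String :=
  match lst with
  | [] => ""          -- items[0] raises IndexError; excluded by Pre_
  | p :: rest =>
    (rest.foldl (fun a x => if x.2.length < a.2.length then x else a) p).1

-- ===== PRECONDITION & SPEC =====
-- Pre_ excludes only the empty dict, on which both A and B raise IndexError.
def Pre_findMinLength (lst : List (String × List Int)) : Prop := lst ≠ []
instance (lst : List (String × List Int)) : Decidable (Pre_findMinLength lst) := by unfold Pre_findMinLength; infer_instance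
def pvWitness_findMinLength : (List (String × List Int)) := [("a", [1])]
def Spec_findMinLength (lst : List (String × List Int)) (out : String) : Prop := out = findMinLength_alt lst
instance (lst : List (String × List Int)) (out : String) : Decidable (Spec_findMinLength lst out) := by unfold Spec_findMinLength; infer_instance

-- ===== CLAIM (what is proved, stated in full; the proofs are below) =====
def Claim_equal_findMinLength : Prop := ∀ (lst : List (String × List Int)), Dom_findMinLength lst → Pre_findMinLength lst → Spec_findMinLength lst (findMinLength lst)

-- ===== LEMMAS AND PROOFS =====

-- B's single-pass fold
def pvLoop (p : String × List Int) (t : List (String × List Int)) : String × List Int :=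
  t.foldl (fun a x => if x.2.length < a.2.length then x else a) p

theorem pvLoop_nil (p : String × List Int) : pvLoop p [] = p := rfl

theorem pvLoop_cons (p x : String × List Int) (t : List (String × List Int)) :
    pvLoop p (x :: t) = pvLoop (if x.2.length < p.2.length then x else p) t := rfl

-- the fold result is the seed or strictly shorter
theorem pvLoop_dichotomy (t : List (String × List Int)) :
    ∀ p, pvLoop p t = p ∨ (pvLoop p t).2.length < p.2.length := by
  induction t with
  | nil => intro p; exact Or.inl rfl
  | cons x t ih =>
    intro p
    rw [pvLoop_cons]
    by_cases h : x.2.length < p.2.length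
    · simp only [if_pos h]
      rcases ih x with h1 | h1
      · right; rw [h1]; exact h
      · right; exact lt_trans h1 h
    · simp only [if_neg h]; exact ih p

theorem pvLoop_le (p : String × List Int) (t : List (String × List Int)) :
    (pvLoop p t).2.length ≤ p.2.length := by
  rcases pvLoop_dichotomy t p with h | h
  · rw [h]
  · exact le_of_lt h

-- the value component of B's fold equals A's fold over the values
theorem pvLoop_snd (t : List (String × List Int)) :
    ∀ p, (pvLoop p t).2 = (t.map (·.2)).foldl (fun m i => if i.length < m.length then i else m) p.2 := by
  induction t with
  | nil => intro p; rfl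
  | cons x t ih =>
    intro p
    rw [pvLoop_cons, List.map_cons, List.foldl_cons, ih]
    by_cases h : x.2.length < p.2.length
    · simp [h]
    · simp [h]

-- A's equality re-scan finds exactly B's winning pair
theorem pvFind_loop (t : List (String × List Int)) :
    ∀ p, (p :: t).find? (fun kv => kv.2 == (pvLoop p t).2) = some (pvLoop p t) := by
  induction t with
  | nil => intro p; simp [pvLoop_nil, List.find?]
  | cons x t ih =>
    intro p
    rw [pvLoop_cons]
    by_cases h : x.2.length < p.2.length
    · simp only [if_pos h]
      have hle : (pvLoop x t).2.length ≤ x.2.length := pvLoop_le x t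
      have hne : (p.2 == (pvLoop x t).2) = false := by
        apply beq_false_of_ne
        intro he
        have : p.2.length = (pvLoop x t).2.length := by rw [he]
        omega
      rw [List.find?]
      simp only [hne]
      exact ih x
    · simp only [if_neg h]
      rw [not_lt] at h
      have hle : (pvLoop p t).2.length ≤ p.2.length := pvLoop_le p t
      by_cases he : p.2 = (pvLoop p t).2
      · -- head matches: then the fold result must be p itself
        have hp : pvLoop p t = p := by
          rcases pvLoop_dichotomy t p with h1 | h1
          · exact h1
          · exfalso; rw [← he] at h1; omega
        rw [List.find?]
        simp [hp, he]
      · have hne : (p.2 == (pvLoop p t).2) = false := beq_false_of_ne he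
        rw [List.find?]
        simp only [hne]
        have := ih p
        rw [List.find?] at this
        simp only [hne] at this
        -- x does not match either
        have hxne : (x.2 == (pvLoop p t).2) = false := by
          apply beq_false_of_ne
          intro hex
          have h2 : (pvLoop p t).2.length = x.2.length := by rw [hex]
          have hp : pvLoop p t = p := by
            rcases pvLoop_dichotomy t p with h1 | h1
            · exact h1
            · exfalso; omega
          exact he (by rw [hp])
        rw [List.find?]
        simp only [hxne]
        exact this

-- ===== VERDICT (by name: the statement is the Claim_ definition above) =====
theorem findMinLength_spec : Claim_equal_findMinLength := by
  intro lst _ hpre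
  unfold Spec_findMinLength
  match lst with
  | [] => exact absurd rfl hpre
  | p :: rest =>
    show findMinLength (p :: rest) = findMinLength_alt (p :: rest)
    unfold findMinLength findMinLength_alt
    simp only [List.map_cons, List.foldl_cons]
    have h0 : (if p.2.length < p.2.length then p.2 else p.2) = p.2 := by simp
    rw [h0]
    have hsnd := pvLoop_snd rest p
    have hfind := pvFind_loop rest p
    rw [← hsnd, hfind]
    rfl
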